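-- pv_equiv track=rewrite | github.com/freelawproject/wiki | wiki/lib/inheritance.py | _resolve_cached
-- ===== SOURCE A (Python) =====
-- _FIELD_DEFAULTS = {
--     "visibility": "public",
--     "editability": "restricted",
--     "in_sitemap": "include",
--     "in_llms_txt": "exclude",
-- }
--
-- def _resolve_cached(dir_id, field_name, dir_data, cache):
--     """Recursively resolve with memoization."""
--     if dir_id in cache:
--         return cache[dir_id]
--
--     parent_id, value, title, _path = dir_data[dir_id]
--
--     if value != "inherit":
--         cache[dir_id] = (value, dir_id, title)
--         return cache[dir_id]
--
--     # Inherit from parent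
--     if parent_id is None or parent_id not in dir_data:
--         # Root or orphan — fall back to default
--         default = _FIELD_DEFAULTS[field_name]
--         cache[dir_id] = (default, dir_id, title)
--         return cache[dir_id]
--
--     parent_result = _resolve_cached(parent_id, field_name, dir_data, cache)
--     cache[dir_id] = parent_result
--     return parent_result
-- ===== SOURCE B (Python) =====
-- _FIELD_DEFAULTS = {
--     "visibility": "public",
--     "editability": "restricted",
--     "in_sitemap": "include",
--     "in_llms_txt": "exclude",
-- }
--
-- def _resolve_cached(dir_id, field_name, dir_data, cache):
--     """Two-phase iterative resolve: find the chain's endpoint, then resolve it."""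
--     if dir_id in cache:
--         return cache[dir_id]
--
--     # Phase 1: walk up collecting the inheriting chain; `cur` ends at the endpoint node.
--     chain = []
--     cur = dir_id
--     while (cur not in cache
--            and dir_data[cur][1] == "inherit"
--            and dir_data[cur][0] is not None
--            and dir_data[cur][0] in dir_data):
--         chain.append(cur)
--         cur = dir_data[cur][0]
--
--     # Phase 2: resolve the endpoint.
--     if cur in cache:
--         result = cache[cur]
--     else:
--         parent_id, value, title, _path = dir_data[cur]
--         if value != "inherit":
--             result = (value, cur, title)
--         else:
--             result = (_FIELD_DEFAULTS[field_name], cur, title)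
--         chain.append(cur)
--
--     for node in chain:
--         cache[node] = result
--     return result
-- ===== Notes on version B (the rewrite author's own statement) =====
-- stated objective: alternative
-- what changed: Replaces A's memoized recursion with a two-phase iterative algorithm: a while-loop first walks the parent chain to find the endpoint node, then a separate step resolves the endpoint (cached tuple, explicit value, or field default) and backfills the cache.
import Mathlib
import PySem

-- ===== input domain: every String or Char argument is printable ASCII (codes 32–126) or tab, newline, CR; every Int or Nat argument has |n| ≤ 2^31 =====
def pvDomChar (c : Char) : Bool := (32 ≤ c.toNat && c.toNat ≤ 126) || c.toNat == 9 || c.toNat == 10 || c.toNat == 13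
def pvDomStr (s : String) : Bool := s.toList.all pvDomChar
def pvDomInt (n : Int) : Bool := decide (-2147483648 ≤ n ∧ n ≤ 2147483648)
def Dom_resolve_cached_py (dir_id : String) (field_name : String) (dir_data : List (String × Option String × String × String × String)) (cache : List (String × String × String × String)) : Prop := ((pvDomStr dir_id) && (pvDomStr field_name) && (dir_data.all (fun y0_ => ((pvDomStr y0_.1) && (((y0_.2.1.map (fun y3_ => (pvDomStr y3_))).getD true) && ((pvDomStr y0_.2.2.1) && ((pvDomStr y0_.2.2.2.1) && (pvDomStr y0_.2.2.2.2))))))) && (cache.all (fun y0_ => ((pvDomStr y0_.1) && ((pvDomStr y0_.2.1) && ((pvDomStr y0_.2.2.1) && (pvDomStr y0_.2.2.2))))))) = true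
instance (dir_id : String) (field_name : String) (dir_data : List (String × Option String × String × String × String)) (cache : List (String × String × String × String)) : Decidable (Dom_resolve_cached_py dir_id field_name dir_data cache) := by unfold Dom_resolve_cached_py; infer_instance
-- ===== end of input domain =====

-- B replaces A's memoized recursion by a two-phase iterative algorithm: first walk the parent
-- chain to the endpoint node, then resolve that endpoint separately (objective: alternative
-- decomposition, no speed claim). Both A and B mutate `cache` in place identically; the
-- equivalence proved here is about the RETURN value.

-- _FIELD_DEFAULTS[field_name]  (none = KeyError)
def pvFieldDefault? (fn : String) : Option String :=
  if fn = "visibility" then some "public"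
  else if fn = "editability" then some "restricted"
  else if fn = "in_sitemap" then some "include"
  else if fn = "in_llms_txt" then some "exclude"
  else none

-- ===== PORT A =====
-- A's recursion, cache threaded through; `fuel = |dir_data| + 1` bounds the parent-chain depth
-- (under Pre_ the chain visits distinct keys of dir_data, so the fuel is never exhausted);
-- the ("","","") branches mark inputs where Python raises (KeyError / fuel out ~ RecursionError),
-- all excluded by Pre_.
def resolveARec (fuel : Nat) (dir_id : String) (field_name : String)
    (dir_data : PySem.Dict String (Option String × String × String × String))
    (cache : PySem.Dict String (String × String × String)) :
    (String × String × String) × PySem.Dict String (String × String × String) :=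
  match fuel with
  | 0 => (("", "", ""), cache)
  | fuel + 1 =>
    match cache.get? dir_id with
    | some r => (r, cache)                                    -- if dir_id in cache: return cache[dir_id]
    | none =>
      match dir_data.get? dir_id with
      | none => (("", "", ""), cache)                         -- dir_data[dir_id] raises KeyError
      | some (parent_id, value, title, _path) =>
        if value ≠ "inherit" then
          ((value, dir_id, title), cache.insert dir_id (value, dir_id, title))
        else
          -- if parent_id is None or parent_id not in dir_data: default
          let rootCase :=
            match pvFieldDefault? field_name with
            | none => (("", "", ""), cache)                   -- _FIELD_DEFAULTS[field_name] raises KeyError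
            | some d => ((d, dir_id, title), cache.insert dir_id (d, dir_id, title))
          match parent_id with
          | none => rootCase
          | some pid =>
            if (dir_data.get? pid).isNone then rootCase
            else
              let pr := resolveARec fuel pid field_name dir_data cache
              (pr.1, pr.2.insert dir_id pr.1)

def resolve_cached_py (dir_id : String) (field_name : String) (dir_data : List (String × Option String × String × String × String)) (cache : List (String × String × String × String)) : String × String × String :=
  (resolveARec (dir_data.length + 1) dir_id field_name (PySem.Dict.mk dir_data) (PySem.Dict.mk cache)).1

-- ===== PORT B =====
-- Phase 1 of Source B: the while-loop that walks up the chain; it returns the endpoint node `cur`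
-- (none = KeyError on dir_data[cur] inside the loop condition, or fuel exhausted on a cycle —
-- both outside Pre_; Source B's `chain` list only feeds the cache backfill, which does not affect
-- the return value, so it is not carried here).
def pvWalkEnd (fuel : Nat) (cur : String)
    (dir_data : PySem.Dict String (Option String × String × String × String))
    (cache : PySem.Dict String (String × String × String)) : Option String :=
  match fuel with
  | 0 => none
  | fuel + 1 =>
    if (cache.get? cur).isSome then some cur
    else
      match dir_data.get? cur with
      | none => none                                          -- dir_data[cur] raises KeyError
      | some (parent_id, value, _title, _path) =>
        if value ≠ "inherit" then some cur
        else
          match parent_id with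
          | none => some cur
          | some pid =>
            if (dir_data.get? pid).isNone then some cur
            else pvWalkEnd fuel pid dir_data cache

-- Phase 2 of Source B: resolve the endpoint node (("","","") marks Python's KeyError, outside Pre_).
def pvEndpointResult (cur : String) (field_name : String)
    (dir_data : PySem.Dict String (Option String × String × String × String))
    (cache : PySem.Dict String (String × String × String)) : String × String × String :=
  match cache.get? cur with
  | some r => r
  | none =>
    match dir_data.get? cur with
    | none => ("", "", "")
    | some (_parent_id, value, title, _path) =>
      if value ≠ "inherit" then (value, cur, title)
      else
        match pvFieldDefault? field_name with
        | none => ("", "", "")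
        | some d => (d, cur, title)

def resolve_cached_py_alt (dir_id : String) (field_name : String) (dir_data : List (String × Option String × String × String × String)) (cache : List (String × String × String × String)) : String × String × String :=
  let dd := PySem.Dict.mk dir_data
  let c := PySem.Dict.mk cache
  match c.get? dir_id with
  | some r => r
  | none =>
    match pvWalkEnd (dir_data.length + 1) dir_id dd c with
    | none => ("", "", "")
    | some e => pvEndpointResult e field_name dd c

-- ===== PRECONDITION & SPEC =====
-- Used only by Pre_: the n-th ancestor of dir_id under the pure parent map of dir_data
-- (none once a key is missing or a parent is None).
def pvAnc (dd : PySem.Dict String (Option String × String × String × String))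
    (dir_id : String) : Nat → Option String
  | 0 => some dir_id
  | n + 1 => (pvAnc dd dir_id n).bind (fun i => (dd.get? i).bind (fun e => e.1))

-- Node i is an interior link of an inheritance chain: not cached, value "inherit", parent present in dir_data.
def pvChainStep (dd : PySem.Dict String (Option String × String × String × String))
    (c : PySem.Dict String (String × String × String)) (i : String) : Bool :=
  (c.get? i).isNone &&
    (match dd.get? i with
     | some (some p, v, _, _) => v == "inherit" && (dd.get? p).isSome
     | _ => false)

-- Node i resolves on the spot: cached, or an explicit value, or a root/orphan whose field has a default.
def pvTerminal (dd : PySem.Dict String (Option String × String × String × String))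
    (c : PySem.Dict String (String × String × String)) (fn i : String) : Bool :=
  (c.get? i).isSome ||
    (match dd.get? i with
     | none => false
     | some (p, v, _, _) =>
       v != "inherit" ||
         ((match p with | none => true | some q => (dd.get? q).isNone) &&
          (pvFieldDefault? fn).isSome))

-- Pre_ = exactly the inputs on which Python A returns normally: some ancestor at depth
-- n ≤ |dir_data| is a terminal node (cached / explicit value / root-or-orphan with a known
-- default) and every ancestor before it is an interior chain link; otherwise A raises KeyError
-- (a missing key, or field_name without a default at a root/orphan) or RecursionError (a cycle).
-- The bound is no size cap: an acyclic chain of distinct dir_data keys is at most |dir_data| long.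
def Pre_resolve_cached_py (dir_id : String) (field_name : String) (dir_data : List (String × Option String × String × String × String)) (cache : List (String × String × String × String)) : Prop :=
  ∃ n < dir_data.length + 1,
    (∀ m < n, ((pvAnc (PySem.Dict.mk dir_data) dir_id m).map
        (pvChainStep (PySem.Dict.mk dir_data) (PySem.Dict.mk cache))).getD false = true) ∧
    ((pvAnc (PySem.Dict.mk dir_data) dir_id n).map
        (pvTerminal (PySem.Dict.mk dir_data) (PySem.Dict.mk cache) field_name)).getD false = true
instance (dir_id : String) (field_name : String) (dir_data : List (String × Option String × String × String × String)) (cache : List (String × String × String × String)) : Decidable (Pre_resolve_cached_py dir_id field_name dir_data cache) := by unfold Pre_resolve_cached_py; infer_instance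

def pvWitness_resolve_cached_py : String × String × (List (String × Option String × String × String × String)) × (List (String × String × String × String)) :=
  ("a", "visibility", [("a", some "r", "inherit", "ta", "pa"), ("r", none, "public", "tr", "pr")], [])

def Spec_resolve_cached_py (dir_id : String) (field_name : String) (dir_data : List (String × Option String × String × String × String)) (cache : List (String × String × String × String)) (out : String × String × String) : Prop := out = resolve_cached_py_alt dir_id field_name dir_data cache
instance (dir_id : String) (field_name : String) (dir_data : List (String × Option String × String × String × String)) (cache : List (String × String × String × String)) (out : String × String × String) : Decidable (Spec_resolve_cached_py dir_id field_name dir_data cache out) := by unfold Spec_resolve_cached_py; infer_instance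

-- ===== CLAIM (what is proved, stated in full; the proofs are below) =====
def Claim_equal_resolve_cached_py : Prop := ∀ (dir_id : String) (field_name : String) (dir_data : List (String × Option String × String × String × String)) (cache : List (String × String × String × String)), Dom_resolve_cached_py dir_id field_name dir_data cache → Pre_resolve_cached_py dir_id field_name dir_data cache → Spec_resolve_cached_py dir_id field_name dir_data cache (resolve_cached_py dir_id field_name dir_data cache)

-- ===== LEMMAS AND PROOFS =====

-- A's recursion returns exactly B's endpoint resolution for every fuel, node and cache:
-- both descend the same chain, and A writes nothing to the cache before descending.
theorem resolveARec_fst_eq_walk (fuel : Nat) :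
    ∀ (cur fn : String) (dd : PySem.Dict String (Option String × String × String × String))
      (c : PySem.Dict String (String × String × String)),
    (resolveARec fuel cur fn dd c).1 =
      (match pvWalkEnd fuel cur dd c with
       | none => ("", "", "")
       | some e => pvEndpointResult e fn dd c) := by
  induction fuel with
  | zero => intros; rfl
  | succ n ih =>
    intro cur fn dd c
    simp only [resolveARec, pvWalkEnd]
    cases hc : c.get? cur with
    | some r => simp [hc, pvEndpointResult]
    | none =>
      simp only [Option.isSome_none, Bool.false_eq_true, if_false]
      cases hd : dd.get? cur with
      | none => rfl
      | some e =>
        obtain ⟨p, v, t, pa⟩ := e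
        by_cases hv : v = "inherit"
        · simp only [hv, ne_eq, not_true_eq_false, if_false]
          cases p with
          | none =>
            cases hf : pvFieldDefault? fn <;>
              simp [pvEndpointResult, hc, hd, hv, hf]
          | some pid =>
            by_cases hp : (dd.get? pid).isNone
            · simp only [hp, if_true]
              cases hf : pvFieldDefault? fn <;>
                simp [pvEndpointResult, hc, hd, hv, hf]
            · simp only [hp]
              exact ih pid fn dd c
        · simp only [ne_eq, hv, not_false_eq_true, if_true]
          simp [pvEndpointResult, hc, hd, hv]

-- ===== VERDICT (by name: the statement is the Claim_ definition above) =====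
theorem resolve_cached_py_spec : Claim_equal_resolve_cached_py := by
  intro dir_id field_name dir_data cache _hDom _hPre
  unfold Spec_resolve_cached_py resolve_cached_py resolve_cached_py_alt
  cases h : (PySem.Dict.mk cache).get? dir_id with
  | some r => simp only [resolveARec, h]
  | none =>
    simp only [h]
    exact resolveARec_fst_eq_walk _ _ _ _ _
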